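-- pv_equiv track=rewrite | github.com/dexterchan/DailyChallenge | DEC2019/TrappingRainwater.py | __sliceLvl
-- ===== SOURCE A (Python) =====
-- def __sliceLvl (arr, lvl):
--     arrlvl = []
--     for l in arr:
--         arrlvl.append(max(0, l-lvl))
--
--     #find water trapped
--     cnt = False
--     chkW = 0
--     confirmedW = 0
--     if arrlvl[0] > 0:
--         cnt=True
--     for i in range(1, len(arrlvl)):
--         if cnt:
--             if arrlvl[i] == 0:
--                 chkW = chkW + 1
--             else:
--                 confirmedW = confirmedW + chkW
--                 chkW = 0
--         else:
--             if arrlvl[i] >0: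
--                 cnt = True
--     return confirmedW
-- ===== SOURCE B (Python) =====
-- def __sliceLvl(arr, lvl):
--     heights = [max(0, l - lvl) for l in arr]
--     if not any(heights):
--         return 0
--     while heights[-1] == 0:
--         heights.pop()
--     heights.reverse()
--     while heights[-1] == 0:
--         heights.pop()
--     return heights.count(0)
-- ===== Notes on version B (the rewrite author's own statement) =====
-- stated objective: simpler
-- what changed: Replaces A's flag/two-accumulator index scan (pending-zeros counter committed on the next positive) with trim-then-count: drop the zero heights at both ends and count the zeros that remain.
import Mathlib
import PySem

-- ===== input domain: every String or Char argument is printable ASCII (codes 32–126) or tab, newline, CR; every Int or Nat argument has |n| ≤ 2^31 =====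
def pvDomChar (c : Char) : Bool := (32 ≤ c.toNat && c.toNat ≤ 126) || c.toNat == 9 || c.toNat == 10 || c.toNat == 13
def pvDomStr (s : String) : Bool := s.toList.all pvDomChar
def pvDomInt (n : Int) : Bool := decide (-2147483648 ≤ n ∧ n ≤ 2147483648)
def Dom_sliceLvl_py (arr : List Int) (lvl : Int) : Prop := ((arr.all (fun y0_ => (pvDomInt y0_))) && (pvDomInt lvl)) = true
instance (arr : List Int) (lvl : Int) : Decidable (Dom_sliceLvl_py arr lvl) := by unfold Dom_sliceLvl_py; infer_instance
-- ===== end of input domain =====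

-- B replaces A's flag/two-accumulator scan by trimming the zero heights off both ends
-- and counting the zeros left (objective: simpler). Return values only; neither mutates its argument.

-- ===== PORT A =====
-- loop body of A's 'for i in range(1, len(arrlvl))', applied to the fetched element arrlvl[i]
def stepA (s : Bool × Int × Int) (x : Int) : Bool × Int × Int :=
  if s.1 then
    (if x == 0 then (s.1, s.2.1 + 1, s.2.2) else (s.1, 0, s.2.2 + s.2.1))
  else
    (if 0 < x then (true, s.2.1, s.2.2) else s)

def sliceLvl_py (arr : List Int) (lvl : Int) : Int :=
  let arrlvl := arr.foldl (fun acc l => acc ++ [max 0 (l - lvl)]) []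
  -- 'if arrlvl[0] > 0: cnt=True' (arrlvl[0] raises on empty arr: excluded by Pre_)
  let cnt0 : Bool := decide (0 < PySem.List.pyGetD arrlvl 0 0)
  let s := (PySem.List.pyRange 1 (arrlvl.length : Int) 1).foldl
    (fun s i => stepA s (PySem.List.pyGetD arrlvl i 0)) (cnt0, 0, 0)
  s.2.2

-- ===== PORT B =====
-- the trimming loop 'while xs[-1] == 0: xs.pop()', expressed on the reversed list
-- (guaranteed to stop: a nonzero element exists)
def trimFront : List Int → List Int
  | [] => []
  | h :: t => if h == 0 then trimFront t else h :: t

def sliceLvl_py_alt (arr : List Int) (lvl : Int) : Int :=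
  let heights := arr.map (fun l => max 0 (l - lvl))
  if !(heights.any (fun h => h != 0)) then 0   -- 'if not any(heights): return 0' (truthiness = nonzero)
  else
    -- 'while heights[-1] == 0: heights.pop()' = the trimming loop run on the reversed list
    let h1 := (trimFront heights.reverse).reverse
    let h2 := h1.reverse                        -- 'heights.reverse()'
    let h3 := (trimFront h2.reverse).reverse    -- the same pop-from-the-end loop again
    (h3.count 0 : Int)

-- ===== PRECONDITION & SPEC =====
-- Pre_ excludes only the empty list, on which A raises IndexError at arrlvl[0].
def Pre_sliceLvl_py (arr : List Int) (lvl : Int) : Prop := arr ≠ []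
instance (arr : List Int) (lvl : Int) : Decidable (Pre_sliceLvl_py arr lvl) := by unfold Pre_sliceLvl_py; infer_instance
def pvWitness_sliceLvl_py : List Int × Int := ([3, 1, 0, 2, 0], 1)

def Spec_sliceLvl_py (arr : List Int) (lvl : Int) (out : Int) : Prop := out = sliceLvl_py_alt arr lvl
instance (arr : List Int) (lvl : Int) (out : Int) : Decidable (Spec_sliceLvl_py arr lvl out) := by unfold Spec_sliceLvl_py; infer_instance

-- ===== CLAIM (what is proved, stated in full; the proofs are below) =====
def Claim_equal_sliceLvl_py : Prop := ∀ (arr : List Int) (lvl : Int), Dom_sliceLvl_py arr lvl → Pre_sliceLvl_py arr lvl → Spec_sliceLvl_py arr lvl (sliceLvl_py arr lvl)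

-- ===== LEMMAS AND PROOFS =====

def trimBack (xs : List Int) : List Int := (trimFront xs.reverse).reverse

theorem tf_append_of_any (a b : List Int) (h : a.any (fun x => x != 0) = true) :
    trimFront (a ++ b) = trimFront a ++ b := by
  induction a with
  | nil => simp at h
  | cons x a ih =>
    by_cases hx : x = 0
    · subst hx
      simp only [List.any_cons] at h
      simp [trimFront, ih (by simpa using h)]
    · simp [trimFront, hx]

theorem tf_append_of_all_zero (a b : List Int) (h : ∀ x ∈ a, x = 0) :
    trimFront (a ++ b) = trimFront b := by
  induction a with
  | nil => simp
  | cons x a ih =>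
    have hx : x = 0 := h x (by simp)
    simp [trimFront, hx, ih (fun y hy => h y (by simp [hy]))]

theorem trimBack_cons_of_any (x : Int) (rest : List Int)
    (h : rest.any (fun y => y != 0) = true) :
    trimBack (x :: rest) = x :: trimBack rest := by
  unfold trimBack
  rw [List.reverse_cons, tf_append_of_any _ _ (by simpa using h)]
  simp

theorem trimBack_cons_of_all_zero (x : Int) (rest : List Int)
    (h : rest.any (fun y => y != 0) = false) :
    trimBack (x :: rest) = if x == 0 then [] else [x] := by
  unfold trimBack
  have hz : ∀ y ∈ rest.reverse, y = 0 := by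
    simp only [List.any_eq_false, bne_iff_ne, ne_eq, not_not] at h
    intro y hy
    exact h y (List.mem_reverse.mp hy)
  rw [List.reverse_cons, tf_append_of_all_zero _ _ hz]
  by_cases hx : x = 0 <;> simp [trimFront, hx]

-- the cnt=True phase: pending zeros c are committed on the next nonzero element
theorem foldl_stepA_true (xs : List Int) : ∀ (c conf : Int),
    (xs.foldl stepA (true, c, conf)).2.2 =
      conf + (if xs.any (fun h => h != 0) then c + ((trimBack xs).count 0 : Int) else 0) := by
  induction xs with
  | nil => intro c conf; simp
  | cons x rest ih =>
    intro c conf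
    rw [List.foldl_cons]
    by_cases hx : x = 0
    · subst hx
      rw [show stepA (true, c, conf) 0 = (true, c + 1, conf) from by simp [stepA], ih]
      by_cases hr : rest.any (fun h => h != 0) = true
      · rw [trimBack_cons_of_any _ _ hr]
        have h2 : ((0:Int) :: rest).any (fun h => h != 0) = true := by simpa using hr
        rw [if_pos hr, if_pos h2, List.count_cons]
        simp
        ring
      · simp only [Bool.not_eq_true] at hr
        rw [if_neg (by simp [hr]), if_neg (by simp [hr])]
    · rw [show stepA (true, c, conf) x = (true, 0, conf + c) from by simp [stepA, hx], ih]
      have h2 : (x :: rest).any (fun h => h != 0) = true := by simp [hx]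
      rw [if_pos h2]
      by_cases hr : rest.any (fun h => h != 0) = true
      · rw [trimBack_cons_of_any _ _ hr, if_pos hr, List.count_cons]
        simp [hx]
        ring
      · simp only [Bool.not_eq_true] at hr
        rw [trimBack_cons_of_all_zero _ _ (by simpa [List.any_eq_false] using hr),
            if_neg (by simp [hr])]
        simp [hx]

-- the cnt=False phase skips exactly the leading zeros (heights are nonnegative)
theorem foldl_stepA_false (xs : List Int) (hnn : ∀ x ∈ xs, 0 ≤ x) :
    (xs.foldl stepA (false, 0, 0)).2.2 = ((trimFront xs).foldl stepA (true, 0, 0)).2.2 := by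
  induction xs with
  | nil => simp [trimFront]
  | cons x rest ih =>
    by_cases hx : x = 0
    · subst hx
      rw [List.foldl_cons, show stepA (false, 0, 0) 0 = (false, 0, 0) from by simp [stepA]]
      rw [show trimFront (0 :: rest) = trimFront rest from by simp [trimFront]]
      exact ih (fun y hy => hnn y (by simp [hy]))
    · have hpos : 0 < x := lt_of_le_of_ne (hnn x (by simp)) (Ne.symm hx)
      rw [List.foldl_cons, show stepA (false, 0, 0) x = (true, 0, 0) from by simp [stepA, hpos]]
      rw [show trimFront (x :: rest) = x :: rest from by simp [trimFront, hx]]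
      rw [List.foldl_cons, show stepA (true, 0, 0) x = (true, 0, 0) from by simp [stepA, hx]]

theorem any_trimFront (xs : List Int) :
    (trimFront xs).any (fun h => h != 0) = xs.any (fun h => h != 0) := by
  induction xs with
  | nil => simp [trimFront]
  | cons x rest ih =>
    by_cases hx : x = 0
    · subst hx; simp [trimFront, ih]
    · simp [trimFront, hx]

theorem trimFront_of_all_zero (xs : List Int) (h : ∀ x ∈ xs, x = 0) : trimFront xs = [] := by
  induction xs with
  | nil => rfl
  | cons x rest ih =>
    have hx : x = 0 := h x (by simp)
    simp [trimFront, hx, ih (fun y hy => h y (by simp [hy]))]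

theorem trim_commute (xs : List Int) : trimFront (trimBack xs) = trimBack (trimFront xs) := by
  induction xs with
  | nil => simp [trimBack, trimFront]
  | cons x rest ih =>
    by_cases hx : x = 0
    · subst hx
      rw [show trimFront (0 :: rest) = trimFront rest from by simp [trimFront]]
      by_cases hr : rest.any (fun y => y != 0) = true
      · rw [trimBack_cons_of_any _ _ hr,
            show trimFront ((0:Int) :: trimBack rest) = trimFront (trimBack rest) from by
              simp [trimFront],
            ih]
      · simp only [Bool.not_eq_true] at hr
        have hz : ∀ y ∈ rest, y = 0 := by simpa [List.any_eq_false] using hr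
        rw [trimBack_cons_of_all_zero _ _ hr, trimFront_of_all_zero rest hz]
        simp [trimFront, trimBack]
    · rw [show trimFront (x :: rest) = x :: rest from by simp [trimFront, hx]]
      by_cases hr : rest.any (fun y => y != 0) = true
      · rw [trimBack_cons_of_any _ _ hr,
            show trimFront (x :: trimBack rest) = x :: trimBack rest from by
              simp [trimFront, hx]]
      · simp only [Bool.not_eq_true] at hr
        rw [trimBack_cons_of_all_zero _ _ hr]
        simp [trimFront, hx]

theorem main_on_heights (hs : List Int) (hne : hs ≠ []) (hnn : ∀ x ∈ hs, 0 ≤ x) :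
    ((PySem.List.pyRange 1 (hs.length : Int)).foldl
        (fun s i => stepA s (PySem.List.pyGetD hs i 0))
        (decide (0 < PySem.List.pyGetD hs 0 0), 0, 0)).2.2 =
      if (!hs.any fun h => h != 0) = true then 0
      else (((trimFront ((trimFront hs.reverse).reverse)).reverse).count 0 : Int) := by
  obtain ⟨h, t, rfl⟩ := List.exists_cons_of_ne_nil hne
  rw [PySem.List.foldl_pyRange_pyGetD' (h :: t) 0
        (f := stepA) ((decide (0 < PySem.List.pyGetD (h :: t) 0 0), 0, 0)) (by norm_num)]
  have hdrop : (h :: t).drop (1 : Int).toNat = t := by simp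
  rw [hdrop]
  have hstart : (t.foldl stepA (decide (0 < PySem.List.pyGetD (h :: t) 0 0), 0, 0)).2.2
      = ((h :: t).foldl stepA (false, 0, 0)).2.2 := by
    rw [PySem.List.pyGetD_zero_cons]
    by_cases hh : 0 < h
    · rw [List.foldl_cons, show stepA (false, 0, 0) h = (true, 0, 0) from by simp [stepA, hh]]
      simp [hh]
    · have h0 : h = 0 := le_antisymm (not_lt.mp hh) (hnn h (by simp))
      subst h0
      rw [List.foldl_cons, show stepA (false, 0, 0) 0 = (false, 0, 0) from by simp [stepA]]
      simp
  rw [hstart, foldl_stepA_false _ hnn, foldl_stepA_true, any_trimFront]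
  by_cases hany : (h :: t).any (fun x => x != 0) = true
  · rw [if_pos hany]
    simp only [hany, Bool.not_true, Bool.false_eq_true, if_false, zero_add]
    rw [show (trimFront ((h :: t).reverse)).reverse = trimBack (h :: t) from rfl,
        ← trim_commute, List.count_reverse]
  · simp only [Bool.not_eq_true] at hany
    rw [if_neg (by simp [hany])]
    simp [hany]

-- ===== VERDICT (by name: the statement is the Claim_ definition above) =====
theorem sliceLvl_py_spec : Claim_equal_sliceLvl_py := by
  intro arr lvl _ hpre
  unfold Spec_sliceLvl_py sliceLvl_py sliceLvl_py_alt
  have hne : arr.map (fun l => max 0 (l - lvl)) ≠ [] := by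
    simpa [List.map_eq_nil_iff] using hpre
  have hnn : ∀ x ∈ arr.map (fun l => max 0 (l - lvl)), 0 ≤ x := by
    intro x hx
    obtain ⟨l, _, rfl⟩ := List.mem_map.mp hx
    exact le_max_left _ _
  simp only [PySem.List.foldl_append_singleton_eq_map, List.nil_append, List.reverse_reverse]
  exact main_on_heights _ hne hnn
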